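-- pv_equiv track=rewrite | github.com/milindi-1609/OS_Lab | Week 1/Algo_main.py | find_waiting_time
-- ===== SOURCE A (Python) =====
-- def find_waiting_time(bt):
--     waiting_time = list()
--     for i in range(len(bt)):
--         if i==0:
--             waiting_time.append(0)
--         else:
--             waiting_time.append(waiting_time[i-1] +bt[i-1])
--     return waiting_time
-- ===== SOURCE B (Python) =====
-- def find_waiting_time(bt):
--     # closed form: waiting time of process i is the total burst time before it
--     return [sum(bt[:i]) for i in range(len(bt))]
-- ===== Notes on version B (the rewrite author's own statement) =====
-- stated objective: alternative
-- what changed: B computes each waiting time independently from a closed form, sum(bt[:i]) for every index, via a comprehension over fresh slices; it carries no running state and never reads back from the partially built result as A does, trading A's O(n) single stateful pass for an O(n^2) stateless per-element formula.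
import Mathlib
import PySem

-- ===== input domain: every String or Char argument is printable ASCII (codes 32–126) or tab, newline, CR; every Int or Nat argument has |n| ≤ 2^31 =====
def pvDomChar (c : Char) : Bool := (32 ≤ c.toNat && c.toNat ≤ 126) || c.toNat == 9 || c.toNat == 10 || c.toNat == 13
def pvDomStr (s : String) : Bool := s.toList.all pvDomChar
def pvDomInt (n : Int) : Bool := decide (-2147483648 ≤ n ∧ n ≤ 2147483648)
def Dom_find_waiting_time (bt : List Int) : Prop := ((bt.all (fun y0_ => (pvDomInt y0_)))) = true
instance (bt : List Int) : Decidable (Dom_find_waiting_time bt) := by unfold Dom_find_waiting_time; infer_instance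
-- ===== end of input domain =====

-- B replaces A's stateful pass (reading back the previous output element) by a stateless
-- closed form, sum(bt[:i]) for each i; objective: alternative (not faster).

-- ===== PORT A =====
-- loop body of A: append 0 at i = 0, else append waiting_time[i-1] + bt[i-1]
def find_waiting_time_step (bt : List Int) (wt : List Int) (i : Int) : List Int :=
  if i == 0 then wt ++ [0]
  else wt ++ [PySem.List.pyGetD wt (i - 1) 0 + PySem.List.pyGetD bt (i - 1) 0]

def find_waiting_time (bt : List Int) : List Int :=
  (PySem.List.pyRange 0 bt.length 1).foldl (find_waiting_time_step bt) []

-- ===== PORT B =====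
-- [sum(bt[:i]) for i in range(len(bt))]
def find_waiting_time_alt (bt : List Int) : List Int :=
  (PySem.List.pyRange 0 bt.length 1).map (fun i => (PySem.List.slice bt none (some i)).sum)

-- ===== PRECONDITION & SPEC =====
def Spec_find_waiting_time (bt : List Int) (out : List Int) : Prop := out = find_waiting_time_alt bt
instance (bt : List Int) (out : List Int) : Decidable (Spec_find_waiting_time bt out) := by unfold Spec_find_waiting_time; infer_instance

-- ===== CLAIM (what is proved, stated in full; the proofs are below) =====
def Claim_equal_find_waiting_time : Prop := ∀ (bt : List Int), Dom_find_waiting_time bt → Spec_find_waiting_time bt (find_waiting_time bt)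

-- ===== LEMMAS AND PROOFS =====

-- reference value: the list of prefix sums [sum (take 0), …, sum (take (n-1))]
def pvPrefix (bt : List Int) (n : Nat) : List Int :=
  (List.range n).map (fun i => ((bt.take i).sum : Int))

theorem pvPrefix_succ (bt : List Int) (n : Nat) :
    pvPrefix bt (n + 1) = pvPrefix bt n ++ [((bt.take n).sum : Int)] := by
  simp [pvPrefix, List.range_succ]

theorem pvA_inv (bt : List Int) (n : Nat) (hn : n ≤ bt.length) :
    (PySem.List.pyRange 0 (n : Int) 1).foldl (find_waiting_time_step bt) [] = pvPrefix bt n := by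
  induction n with
  | zero => simp [pvPrefix]
  | succ m ih =>
    have hm : m ≤ bt.length := Nat.le_of_succ_le hn
    have hc : ((m : Int) + 1) = ((m + 1 : Nat) : Int) := by push_cast; ring
    rw [← hc, PySem.List.pyRange_one_succ_right (by positivity), List.foldl_append, ih hm]
    simp only [List.foldl_cons, List.foldl_nil]
    rcases Nat.eq_zero_or_pos m with h0 | hpos
    · subst h0
      simp [find_waiting_time_step, pvPrefix]
    · have hne : (m : Int) ≠ 0 := by exact_mod_cast Nat.pos_iff_ne_zero.mp hpos
      have hget1 : PySem.List.pyGetD (pvPrefix bt m) ((m : Int) - 1) 0 = ((bt.take (m - 1)).sum : Int) := by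
        have h1 : ((m : Int) - 1) = ((m - 1 : Nat) : Int) := by omega
        rw [h1, PySem.List.pyGetD_natCast]
        have hlt : m - 1 < m := by omega
        simp [pvPrefix, List.getD_eq_getElem?_getD, hlt]
      have hget2 : PySem.List.pyGetD bt ((m : Int) - 1) 0 = bt[m - 1]'(by omega) := by
        have h1 : ((m : Int) - 1) = ((m - 1 : Nat) : Int) := by omega
        rw [h1, PySem.List.pyGetD_natCast]
        have hlt : m - 1 < bt.length := by omega
        simp [List.getD_eq_getElem?_getD, hlt]
      have hsum : ((bt.take (m - 1)).sum : Int) + bt[m - 1]'(by omega) = (bt.take m).sum := by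
        have hm1 : m - 1 + 1 = m := by omega
        have hs := List.sum_take_succ bt (m - 1) (by omega)
        rw [hm1] at hs
        omega
      rw [pvPrefix_succ]
      simp [find_waiting_time_step, hget1, hget2, hsum]
      intro h; exact absurd h (by omega)

theorem pvB_eq (bt : List Int) : find_waiting_time_alt bt = pvPrefix bt bt.length := by
  unfold find_waiting_time_alt pvPrefix
  rw [PySem.List.pyRange_one]
  simp only [Int.sub_zero, Int.toNat_natCast, List.map_map]
  refine List.map_congr_left ?_
  intro k _
  simp [PySem.List.slice_to_natCast]

-- ===== VERDICT (by name: the statement is the Claim_ definition above) =====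
theorem find_waiting_time_spec : Claim_equal_find_waiting_time := by
  intro bt _
  unfold Spec_find_waiting_time find_waiting_time
  rw [pvB_eq, pvA_inv bt bt.length le_rfl]
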